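-- pv_equiv track=rewrite | github.com/gage-russell/GCTA-Python-Intro | gcta-python/notebooks/helper-functions/helper-functions.py | comparison_operator_check
-- ===== SOURCE A (Python) =====
-- def comparison_operator_check(operators: str) -> bool:
--     operator_list = "== != > < >= <=".split(' ')
--     # remove spaces
--     usr_inp_no_spaces = [i for i in operators.split(' ') if i != '']
--     # check for uniqueness
--     usr_inp_hashed = {}
--     for each_operator in usr_inp_no_spaces:
--         usr_inp_hashed[each_operator] = ''
--
--     if len(usr_inp_no_spaces) != 6:
--         return False
--
--     for each_operator in operator_list:
--         if each_operator not in usr_inp_no_spaces: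
--             return False
--
--     return True
-- ===== SOURCE B (Python) =====
-- def comparison_operator_check(operators: str) -> bool:
--     tokens = [t for t in operators.split(' ') if t != '']
--     return sorted(tokens) == sorted("== != > < >= <=".split(' '))
-- ===== Notes on version B (the rewrite author's own statement) =====
-- stated objective: simpler
-- what changed: Replaces A's length-check plus per-operator membership scan (and its dead uniqueness dict) with a single sorted-tokens == sorted-operator-list multiset comparison.
import Mathlib
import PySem

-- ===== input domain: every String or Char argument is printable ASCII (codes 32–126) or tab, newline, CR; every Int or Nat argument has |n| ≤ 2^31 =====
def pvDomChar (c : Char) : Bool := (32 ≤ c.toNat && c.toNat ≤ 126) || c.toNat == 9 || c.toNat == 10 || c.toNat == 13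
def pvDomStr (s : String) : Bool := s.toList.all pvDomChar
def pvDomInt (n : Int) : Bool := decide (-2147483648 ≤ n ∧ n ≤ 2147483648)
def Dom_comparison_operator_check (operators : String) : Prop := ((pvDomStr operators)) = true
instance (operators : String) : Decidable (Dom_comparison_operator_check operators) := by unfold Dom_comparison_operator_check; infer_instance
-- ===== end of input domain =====

-- B replaces A's length-check plus per-operator membership scan (and A's dead uniqueness dict)
-- with a sort-then-compare multiset equality against the fixed operator list (objective: simpler).


-- ===== PORT A =====
def comparison_operator_check (operators : String) : Bool :=
  let operator_list := ((PySem.Str.split? "== != > < >= <=" " ").getD [])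
  let usr_inp_no_spaces := (((PySem.Str.split? operators " ").getD [])).filter (fun i => i != "")
  -- dead uniqueness dict, kept as in the Python
  let _usr_inp_hashed : PySem.Dict String String :=
    usr_inp_no_spaces.foldl (fun d t => d.insert t "") PySem.Dict.empty
  if usr_inp_no_spaces.length ≠ 6 then false
  else operator_list.all (fun op => decide (op ∈ usr_inp_no_spaces))

-- ===== PORT B =====
def comparison_operator_check_alt (operators : String) : Bool :=
  let tokens := (((PySem.Str.split? operators " ").getD [])).filter (fun t => t != "")
  decide (PySem.List.sorted tokens (fun x => x) false =
          PySem.List.sorted (((PySem.Str.split? "== != > < >= <=" " ").getD [])) (fun x => x) false)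

-- ===== PRECONDITION & SPEC =====
def Spec_comparison_operator_check (operators : String) (out : Bool) : Prop := out = comparison_operator_check_alt operators
instance (operators : String) (out : Bool) : Decidable (Spec_comparison_operator_check operators out) := by unfold Spec_comparison_operator_check; infer_instance

-- ===== CLAIM (what is proved, stated in full; the proofs are below) =====
def Claim_equal_comparison_operator_check : Prop := ∀ (operators : String), Dom_comparison_operator_check operators → Spec_comparison_operator_check operators (comparison_operator_check operators)

-- ===== LEMMAS AND PROOFS =====

-- A's check (length 6 and every operator present) holds iff the tokens are a permutation of the operator list.
theorem pv_check_iff_perm (ts : List String) :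
    (ts.length = 6 ∧ ∀ op ∈ (["==", "!=", ">", "<", ">=", "<="] : List String), op ∈ ts)
    ↔ ts.Perm ["==", "!=", ">", "<", ">=", "<="] := by
  constructor
  · rintro ⟨hlen, hmem⟩
    have hs := List.subperm_of_subset
      (l₁ := (["==", "!=", ">", "<", ">=", "<="] : List String)) (by decide)
      (fun x hx => hmem x hx)
    exact (hs.perm_of_length_le (by simp [hlen])).symm
  · intro hp
    exact ⟨hp.length_eq, fun op hop => hp.mem_iff.mpr hop⟩

theorem comparison_operator_check_main (ts : List String) :
    (if ts.length ≠ 6 then false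
     else (["==", "!=", ">", "<", ">=", "<="] : List String).all (fun op => decide (op ∈ ts)))
    = decide (PySem.List.sorted ts (fun x => x) false =
              PySem.List.sorted (["==", "!=", ">", "<", ">=", "<="] : List String) (fun x => x) false) := by
  have hdec : decide (PySem.List.sorted ts (fun x => x) false =
        PySem.List.sorted (["==", "!=", ">", "<", ">=", "<="] : List String) (fun x => x) false)
      = decide (ts.Perm ["==", "!=", ">", "<", ">=", "<="]) :=
    decide_eq_decide.mpr (PySem.List.sorted_id_eq_sorted_id_iff_perm ..)
  rw [hdec]
  by_cases h6 : ts.length = 6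
  · simp only [h6, ne_eq, not_true_eq_false, if_false]
    have hall : (["==", "!=", ">", "<", ">=", "<="] : List String).all (fun op => decide (op ∈ ts))
        = decide (∀ op ∈ (["==", "!=", ">", "<", ">=", "<="] : List String), op ∈ ts) := by
      simp
    rw [hall]
    exact decide_eq_decide.mpr (by rw [← pv_check_iff_perm]; simp [h6])
  · have hnp : ¬ ts.Perm ["==", "!=", ">", "<", ">=", "<="] := fun hp => h6 hp.length_eq
    simp [h6, hnp]

theorem comparison_operator_check_eq_alt (operators : String) :
    comparison_operator_check operators = comparison_operator_check_alt operators := by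
  unfold comparison_operator_check comparison_operator_check_alt
  exact comparison_operator_check_main
    (((PySem.Str.split? operators " ").getD []).filter (fun t => t != ""))

-- ===== VERDICT (by name: the statement is the Claim_ definition above) =====
theorem comparison_operator_check_spec : Claim_equal_comparison_operator_check := by
  intro operators _
  unfold Spec_comparison_operator_check
  exact comparison_operator_check_eq_alt operators
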